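-- pv_equiv track=rewrite | github.com/KaneOrca/ClawSeat | core/skills/socratic-requirements/scripts/reporting.py | format_summary_card
-- ===== SOURCE A (Python) =====
-- from collections import OrderedDict
-- from typing import Any
--
-- def format_summary_card(aggregated: list[dict[str, Any]]) -> str:
--     """Format a Chinese Markdown summary card grouped by project."""
--
--     if not aggregated:
--         return "## 决策汇总\n\n暂无决策记录。"
--
--     grouped: "OrderedDict[str, list[dict[str, Any]]]" = OrderedDict()
--     for record in aggregated:
--         project = str(record.get("project") or "unknown")
--         grouped.setdefault(project, []).append(record)
--
--     sections: list[str] = []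
--     for project, records in grouped.items():
--         sections.append(f"## {project} ({len(records)} 条)")
--         for record in records:
--             ts = str(record.get("ts", "unknown-ts"))
--             seat = str(record.get("seat", "unknown"))
--             title = str(record.get("title", "(untitled)"))
--             sections.append(f"- {ts} [{seat}] {title}")
--         sections.append("")
--     return "\n".join(sections).rstrip()
-- ===== SOURCE B (Python) =====
-- def format_summary_card(aggregated):
--     """Format a Chinese Markdown summary card grouped by project.
--
--     Alternative decomposition: first extract the ordered list of distinct
--     project keys, then re-scan the whole input once per key to collect and
--     render that project's records (no incremental bucketing dict)."""
--     if not aggregated: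
--         return "## 决策汇总\n\n暂无决策记录。"
--
--     def key(r):
--         return str(r.get("project") or "unknown")
--
--     def line(r):
--         return f"- {str(r.get('ts', 'unknown-ts'))} [{str(r.get('seat', 'unknown'))}] {str(r.get('title', '(untitled)'))}"
--
--     projects = list(dict.fromkeys(key(r) for r in aggregated))
--     sections = []
--     for p in projects:
--         records = [r for r in aggregated if key(r) == p]
--         sections += [f"## {p} ({len(records)} 条)", *map(line, records), ""]
--     return "\n".join(sections).rstrip()
-- ===== Notes on version B (the rewrite author's own statement) =====
-- stated objective: alternative
-- what changed: Replaces the one-pass OrderedDict bucketing with extracting the ordered distinct project keys first and then re-scanning the whole input once per key with a filter to collect and render each group.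
import Mathlib
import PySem

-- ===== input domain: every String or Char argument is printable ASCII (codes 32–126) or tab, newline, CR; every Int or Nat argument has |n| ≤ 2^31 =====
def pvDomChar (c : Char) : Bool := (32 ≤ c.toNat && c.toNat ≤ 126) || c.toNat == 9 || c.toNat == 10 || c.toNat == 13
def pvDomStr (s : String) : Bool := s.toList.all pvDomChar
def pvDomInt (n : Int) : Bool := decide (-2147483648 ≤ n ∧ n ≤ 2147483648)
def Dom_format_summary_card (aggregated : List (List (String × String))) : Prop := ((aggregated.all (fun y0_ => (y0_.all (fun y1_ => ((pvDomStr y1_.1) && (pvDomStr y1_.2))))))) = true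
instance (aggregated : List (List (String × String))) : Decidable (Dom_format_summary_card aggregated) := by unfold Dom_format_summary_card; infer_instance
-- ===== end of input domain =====

-- B re-implements the same formatting by listing the ordered distinct project keys first
-- and re-scanning the input once per key (alternative decomposition, not faster).

-- ===== PORT A =====
def format_summary_card (aggregated : List (List (String × String))) : String :=
  if aggregated = [] then "## 决策汇总\n\n暂无决策记录。"
  else
    -- grouped: OrderedDict built with setdefault(project, []).append(record)
    let grouped : PySem.Dict String (List (List (String × String))) :=
      aggregated.foldl (fun d record =>
        let project : String :=
          match (PySem.Dict.mk record).get? "project" with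
          | some s => if s = "" then "unknown" else s   -- `record.get("project") or "unknown"`
          | none => "unknown"
        d.modify project [] (fun v => v ++ [record])) PySem.Dict.empty
    let sections : List String :=
      grouped.items.foldl (fun acc pr =>
        let acc := acc ++ ["## " ++ pr.1 ++ " (" ++ PySem.Int.toStr (pr.2.length : Int) ++ " 条)"]
        let acc := pr.2.foldl (fun acc record =>
          acc ++ ["- " ++ (PySem.Dict.mk record).getD "ts" "unknown-ts" ++ " ["
                   ++ (PySem.Dict.mk record).getD "seat" "unknown" ++ "] "
                   ++ (PySem.Dict.mk record).getD "title" "(untitled)"]) acc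
        acc ++ [""]) []
    PySem.Str.rstrip (PySem.Str.join "\n" sections)

-- ===== PORT B =====
-- helper `key(r)` of Source B
def pvKeyB (r : List (String × String)) : String :=
  match (PySem.Dict.mk r).get? "project" with
  | some s => if s = "" then "unknown" else s
  | none => "unknown"

-- helper `line(r)` of Source B
def pvLineB (r : List (String × String)) : String :=
  "- " ++ (PySem.Dict.mk r).getD "ts" "unknown-ts" ++ " ["
    ++ (PySem.Dict.mk r).getD "seat" "unknown" ++ "] "
    ++ (PySem.Dict.mk r).getD "title" "(untitled)"

def format_summary_card_alt (aggregated : List (List (String × String))) : String :=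
  if aggregated = [] then "## 决策汇总\n\n暂无决策记录。"
  else
    let projects : List String := PySem.List.dedup (aggregated.map pvKeyB)
    let sections : List String :=
      projects.flatMap (fun p =>
        let records := aggregated.filter (fun r => pvKeyB r == p)
        ("## " ++ p ++ " (" ++ PySem.Int.toStr (records.length : Int) ++ " 条)")
          :: records.map pvLineB ++ [""])
    PySem.Str.rstrip (PySem.Str.join "\n" sections)

-- ===== PRECONDITION & SPEC =====
def Spec_format_summary_card (aggregated : List (List (String × String))) (out : String) : Prop := out = format_summary_card_alt aggregated
instance (aggregated : List (List (String × String))) (out : String) : Decidable (Spec_format_summary_card aggregated out) := by unfold Spec_format_summary_card; infer_instance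

-- ===== CLAIM (what is proved, stated in full; the proofs are below) =====
def Claim_equal_format_summary_card : Prop := ∀ (aggregated : List (List (String × String))), Dom_format_summary_card aggregated → Spec_format_summary_card aggregated (format_summary_card aggregated)

-- ===== LEMMAS AND PROOFS =====

-- `acc; for x: acc.append(f x)` is `acc ++ map f`
theorem pv_foldl_append_map {α β : Type} (f : α → β) (l : List α) (acc : List β) :
    l.foldl (fun a x => a ++ [f x]) acc = acc ++ l.map f := by
  induction l generalizing acc with
  | nil => simp
  | cons x xs ih => simp [List.foldl_cons, ih]

-- the grouped dict's value at p is the filter of the input by key p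
theorem pv_getD_grouped (l : List (List (String × String))) (p : String) :
    (l.foldl (fun d record =>
        d.modify (pvKeyB record) [] (fun v => v ++ [record])) PySem.Dict.empty).getD p []
      = l.filter (fun r => pvKeyB r == p) := by
  have h1 : l.foldl (fun d record => d.modify (pvKeyB record) [] (fun v => v ++ [record]))
      (PySem.Dict.empty : PySem.Dict String (List (List (String × String))))
      = (l.map (fun r => (pvKeyB r, r))).foldl
          (fun d q => d.modify q.1 [] (fun v => v ++ [q.2])) PySem.Dict.empty := by
    rw [List.foldl_map]
  rw [h1, PySem.Dict.getD_foldl_modify_append]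
  simp [PySem.Dict.getD_empty, List.filter_map, Function.comp_def]

-- the grouped dict's items, as B computes them
theorem pv_items_grouped (l : List (List (String × String))) :
    (l.foldl (fun d record =>
        d.modify (pvKeyB record) [] (fun v => v ++ [record])) PySem.Dict.empty).items
      = (PySem.List.dedup (l.map pvKeyB)).map
          (fun p => (p, l.filter (fun r => pvKeyB r == p))) := by
  set grouped := l.foldl (fun d record =>
      d.modify (pvKeyB record) [] (fun v => v ++ [record]))
      (PySem.Dict.empty : PySem.Dict String (List (List (String × String)))) with hg
  have hnd : grouped.keys.Nodup := by
    rw [hg]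
    exact PySem.Dict.nodup_keys_foldl_modify_key l pvKeyB [] (fun _ record v => v ++ [record]) _
      PySem.Dict.nodup_keys_empty
  have hkeys : grouped.keys = PySem.List.dedup (l.map pvKeyB) := by
    rw [hg, PySem.Dict.keys_foldl_modify_key]
    simp [PySem.Dict.keys_empty, PySem.Set.update_nil_left]
  rw [PySem.Dict.items_eq_map_keys grouped hnd [], hkeys]
  refine List.map_congr_left (fun p _ => ?_)
  rw [hg, pv_getD_grouped]

-- A's generic section loop equals the flatMap B builds
theorem pv_sections_eq {ρ : Type} (line : ρ → String) (hdr : String × List ρ → String)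
    (groups : List (String × List ρ)) (acc : List String) :
    groups.foldl (fun acc pr =>
        pr.2.foldl (fun a r => a ++ [line r]) (acc ++ [hdr pr]) ++ [""]) acc
      = acc ++ groups.flatMap (fun pr => hdr pr :: pr.2.map line ++ [""]) := by
  induction groups generalizing acc with
  | nil => simp
  | cons pr ps ih =>
    simp only [List.foldl_cons, List.flatMap_cons]
    rw [pv_foldl_append_map, ih]
    simp

-- ===== VERDICT (by name: the statement is the Claim_ definition above) =====
theorem format_summary_card_spec : Claim_equal_format_summary_card := by
  intro aggregated _
  unfold Spec_format_summary_card format_summary_card format_summary_card_alt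
  by_cases h : aggregated = []
  · simp [h]
  · simp only [h, if_false]
    congr 1
    congr 1
    have hk : (fun (d : PySem.Dict String (List (List (String × String)))) record =>
        d.modify
          (match (PySem.Dict.mk record).get? "project" with
           | some s => if s = "" then "unknown" else s
           | none => "unknown")
          [] (fun v => v ++ [record]))
        = (fun d record => d.modify (pvKeyB record) [] (fun v => v ++ [record])) := by
      funext d record; rfl
    rw [hk, pv_items_grouped,
        pv_sections_eq (fun record =>
          "- " ++ (PySem.Dict.mk record).getD "ts" "unknown-ts" ++ " ["
            ++ (PySem.Dict.mk record).getD "seat" "unknown" ++ "] "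
            ++ (PySem.Dict.mk record).getD "title" "(untitled)")
          (fun pr => "## " ++ pr.1 ++ " (" ++ PySem.Int.toStr (pr.2.length : Int) ++ " 条)")]
    rw [List.flatMap_map]
    rfl
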